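-- pv_equiv track=rewrite | github.com/jiajunhe98/Advent-of-Code-2021 | day19.py | generate_descriptors
-- ===== SOURCE A (Python) =====
-- def generate_descriptors(data):
--     descriptors = [[] for i in range(len(data))]
--
--     for i in range(len(data)):
--         for j in range(i+1, len(data)):
--             distance = sum([(data[i][x] - data[j][x]) ** 2 for x in range(3)])
--             descriptors[i].append(distance)
--             descriptors[j].append(distance)
--     for i in range(len(descriptors)):
--         descriptors[i] = sorted(descriptors[i])[:8]
--     return descriptors
-- ===== SOURCE B (Python) =====
-- def _insert_sorted(best, d):
--     # insert d into the ascending list best (after any equal elements)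
--     if not best or best[0] > d:
--         return [d] + best
--     return [best[0]] + _insert_sorted(best[1:], d)
--
--
-- def generate_descriptors(data):
--     n = len(data)
--     out = []
--     for i in range(n):
--         best = []  # the (at most) 8 smallest distances seen so far, ascending
--         for j in range(n):
--             if j != i:
--                 d = sum((data[i][x] - data[j][x]) ** 2 for x in range(3))
--                 best = _insert_sorted(best, d)[:8]
--         out.append(best)
--     return out
-- ===== Notes on version B (the rewrite author's own statement) =====
-- stated objective: alternative
-- what changed: Replaces A's shared triangular pass plus per-point sort-and-truncate with online bounded selection: each point does one pass over all other points, maintaining an ascending list of at most 8 smallest distances by ordered insertion and truncation, so the full distance list is never materialised or sorted.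
import Mathlib
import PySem

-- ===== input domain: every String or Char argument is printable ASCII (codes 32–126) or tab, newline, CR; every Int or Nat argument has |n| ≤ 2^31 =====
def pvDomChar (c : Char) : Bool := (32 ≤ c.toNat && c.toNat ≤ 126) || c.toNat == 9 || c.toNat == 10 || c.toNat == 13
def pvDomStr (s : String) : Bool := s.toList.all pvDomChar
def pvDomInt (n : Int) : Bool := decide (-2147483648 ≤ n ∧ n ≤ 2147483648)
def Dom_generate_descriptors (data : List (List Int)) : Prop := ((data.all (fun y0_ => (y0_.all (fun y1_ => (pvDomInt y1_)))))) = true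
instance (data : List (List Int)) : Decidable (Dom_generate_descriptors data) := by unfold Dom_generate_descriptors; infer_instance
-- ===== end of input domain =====

-- B replaces A's shared triangular pass plus per-point sort-and-truncate with online bounded
-- selection: one pass per point keeping the at-most-8 smallest distances by ordered insertion.

-- ===== PORT A =====
-- sum([(data[i][x] - data[j][x]) ** 2 for x in range(3)]) — identical expression in both Pythons.
-- data[i][x] would raise IndexError on a row shorter than 3; Pre_ excludes those inputs, the
-- default 0 of pyGetD is only reached outside Pre_.
def pvDist (data : List (List Int)) (i j : Int) : Int :=
  ((PySem.List.pyRange 0 3 1).map (fun x =>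
    (PySem.List.pyGetD (PySem.List.pyGetD data i []) x 0
     - PySem.List.pyGetD (PySem.List.pyGetD data j []) x 0) ^ 2)).sum

-- literal transliteration of A: descriptors table, triangular double loop appending the
-- distance at positions i and j (indices from range are ≥ 0, so .toNat is exact), then
-- descriptors[i] = sorted(descriptors[i])[:8] (slice [:8] with nonnegative stop = take 8).
def generate_descriptors (data : List (List Int)) : List (List Int) :=
  let n : Int := data.length
  let descriptors : List (List Int) := (PySem.List.pyRange 0 n 1).map (fun _ => ([] : List Int))
  let descriptors := (PySem.List.pyRange 0 n 1).foldl (fun ds i =>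
      (PySem.List.pyRange (i+1) n 1).foldl (fun ds j =>
        let distance := pvDist data i j
        (ds.modify i.toNat (fun l => l ++ [distance])).modify j.toNat (fun l => l ++ [distance]))
        ds) descriptors
  descriptors.map (fun d => (PySem.List.sorted d (fun x => x) false).take 8)

-- ===== PORT B =====
-- literal transliteration of Source B's _insert_sorted (recursive ordered insertion)
def pvInsertSorted : List Int → Int → List Int
  | [], d => [d]
  | x :: xs, d => if x > d then d :: x :: xs else x :: pvInsertSorted xs d

-- literal transliteration of Source B: for each i, one pass over all j (skipping j == i)
-- maintaining `best`, the at-most-8 smallest distances ascending; slice [:8] = take 8.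
def generate_descriptors_alt (data : List (List Int)) : List (List Int) :=
  let n : Int := data.length
  (PySem.List.pyRange 0 n 1).map (fun i =>
    (PySem.List.pyRange 0 n 1).foldl (fun best j =>
      if j != i then (pvInsertSorted best (pvDist data i j)).take 8 else best) [])

-- ===== PRECONDITION & SPEC =====
-- Pre_ excludes exactly the inputs where Python A raises IndexError: two or more points with
-- some row shorter than 3 (with ≤ 1 point no distance is ever computed and A returns normally).
def Pre_generate_descriptors (data : List (List Int)) : Prop :=
  data.length ≤ 1 ∨ ∀ row ∈ data, 3 ≤ row.length
instance (data : List (List Int)) : Decidable (Pre_generate_descriptors data) := by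
  unfold Pre_generate_descriptors; infer_instance
def pvWitness_generate_descriptors : List (List Int) := [[0,0,0],[1,2,3]]

def Spec_generate_descriptors (data : List (List Int)) (out : List (List Int)) : Prop := out = generate_descriptors_alt data
instance (data : List (List Int)) (out : List (List Int)) : Decidable (Spec_generate_descriptors data out) := by unfold Spec_generate_descriptors; infer_instance

-- ===== CLAIM (what is proved, stated in full; the proofs are below) =====
def Claim_equal_generate_descriptors : Prop := ∀ (data : List (List Int)), Dom_generate_descriptors data → Pre_generate_descriptors data → Spec_generate_descriptors data (generate_descriptors data)

-- ===== LEMMAS AND PROOFS =====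

theorem pvDist_symm (data : List (List Int)) (i j : Int) : pvDist data i j = pvDist data j i := by
  have h3 : PySem.List.pyRange 0 3 1 = [0, 1, 2] := by decide
  simp only [pvDist, h3, List.map_cons, List.map_nil, List.sum_cons, List.sum_nil]
  ring

-- the inner loop of A, as it acts on each row (getElem? form covers out-of-range rows)
theorem innerA (data : List (List Int)) (n i a : Int) (ha : i < a) (hi : 0 ≤ i)
    (s : List (List Int)) (k : Nat) :
    ((PySem.List.pyRange a n 1).foldl (fun ds j =>
        let distance := pvDist data i j
        (ds.modify i.toNat (fun l => l ++ [distance])).modify j.toNat (fun l => l ++ [distance])) s)[k]?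
    = (fun l => l ++ (if (k : Int) = i then (PySem.List.pyRange a n 1).map (pvDist data i)
        else if a ≤ (k : Int) ∧ (k : Int) < n then [pvDist data i (k : Int)] else [])) <$> s[k]? := by

  induction hfuel : (n - a).toNat generalizing a s with
  | zero =>
    have hna : n ≤ a := by omega
    have hcond : ¬ (a ≤ (k : Int) ∧ (k : Int) < n) := by omega
    rw [PySem.List.pyRange_one_eq_nil hna]
    simp only [List.foldl_nil, List.map_nil]
    cases s[k]? <;> simp [hcond]
  | succ m ih =>
    have hlt : a < n := by omega
    rw [PySem.List.pyRange_one_cons hlt, List.foldl_cons,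
        ih (a+1) (by omega) _ (by omega)]
    simp only [List.getElem?_modify]
    have hia : (i.toNat = k) = ((k : Int) = i) := by
      apply propext; omega
    have haa : (a.toNat = k) = ((k : Int) = a) := by
      apply propext; omega
    have hka' : (k : Int) ≠ i → (k : Int) = a → pvDist data i (k : Int) = pvDist data i a := by
      intro _ h; rw [h]
    cases hs : s[k]? with
    | none => rfl
    | some l =>
      simp only [Option.map_eq_map, Option.map_some]
      by_cases hki : (k : Int) = i
      · have hka : ¬ ((k : Int) = a) := by omega
        have hia2 : ¬ (i = a) := by omega
        simp [hia, haa, hki, hia2, List.append_assoc]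
      · by_cases hka : (k : Int) = a
        · have hai : ¬ (a = i) := by omega
          simp [hia, haa, hka, hai, hlt]
        · by_cases hc : a + 1 ≤ (k : Int) ∧ (k : Int) < n
          · have h1 : a ≤ (k : Int) ∧ (k : Int) < n := by omega
            simp [hia, haa, hki, hka, h1, hc.1]
          · have h1 : ¬ (a ≤ (k : Int) ∧ (k : Int) < n) := by omega
            simp [hia, haa, hki, hka, h1]
            omega

def pvExtra (data : List (List Int)) (n m : Int) (k : Nat) : List Int :=
  if m ≤ (k : Int) ∧ (k : Int) < n then
    (PySem.List.pyRange m (k : Int) 1).map (fun i => pvDist data i (k : Int))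
      ++ (PySem.List.pyRange ((k : Int)+1) n 1).map (pvDist data (k : Int))
  else []

-- the outer loop of A, rows characterised elementwise
theorem outerA (data : List (List Int)) (n m : Int) (hm : 0 ≤ m)
    (s : List (List Int)) (k : Nat) :
    ((PySem.List.pyRange m n 1).foldl (fun ds i =>
      (PySem.List.pyRange (i+1) n 1).foldl (fun ds j =>
        let distance := pvDist data i j
        (ds.modify i.toNat (fun l => l ++ [distance])).modify j.toNat (fun l => l ++ [distance]))
        ds) s)[k]?
    = (fun l => l ++ pvExtra data n m k) <$> s[k]? := by

  induction hfuel : (n - m).toNat generalizing m s with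
  | zero =>
    have hnm : n ≤ m := by omega
    have hcond : ¬ (m ≤ (k : Int) ∧ (k : Int) < n) := by omega
    rw [PySem.List.pyRange_one_eq_nil hnm]
    simp only [List.foldl_nil, pvExtra, if_neg hcond]
    cases s[k]? <;> simp
  | succ fm ih =>
    have hlt : m < n := by omega
    rw [PySem.List.pyRange_one_cons hlt, List.foldl_cons,
        ih (m+1) (by omega) _ (by omega),
        innerA data n m (m+1) (by omega) hm s k]
    cases hs : s[k]? with
    | none => rfl
    | some l =>
      simp only [Option.map_eq_map, Option.map_some]
      congr 1
      rw [List.append_assoc]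
      congr 1
      by_cases hki : (k : Int) = m
      · have hr : PySem.List.pyRange m (k : Int) 1 = [] :=
          PySem.List.pyRange_one_eq_nil (by omega)
        simp [pvExtra, hki]
        intro h
        exact absurd h (by omega)
      · by_cases hc : m + 1 ≤ (k : Int) ∧ (k : Int) < n
        · have h1 : m ≤ (k : Int) ∧ (k : Int) < n := by omega
          have hr : PySem.List.pyRange m (k : Int) 1 = m :: PySem.List.pyRange (m+1) (k : Int) 1 :=
            PySem.List.pyRange_one_cons (by omega)
          simp [pvExtra, h1, hc, hki, hr]
        · simp only [pvExtra]
          rw [if_neg hki, if_neg hc, if_neg hc,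
              if_neg (show ¬ (m ≤ (k : Int) ∧ (k : Int) < n) from by omega)]
          rfl

-- the split form A's loops produce equals the filtered full scan (shared with B's row)
theorem rowSplit (data : List (List Int)) (n : Int) (k : Nat) (hk : (k : Int) < n) :
    ((PySem.List.pyRange 0 n 1).filter (fun j => j != (k : Int))).map (pvDist data (k : Int))
    = (PySem.List.pyRange 0 (k : Int) 1).map (pvDist data (k : Int))
      ++ (PySem.List.pyRange ((k : Int)+1) n 1).map (pvDist data (k : Int)) := by

  have h0k : (0 : Int) ≤ (k : Int) := by omega
  rw [PySem.List.pyRange_one_append 0 (k : Int) n h0k (by omega),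
      PySem.List.pyRange_one_cons hk, List.filter_append, List.filter_cons]
  have hself : (((k : Int) != (k : Int))) = false := by simp
  rw [hself]
  have hlo : List.filter (fun j => j != (k : Int)) (PySem.List.pyRange 0 (k : Int) 1)
      = PySem.List.pyRange 0 (k : Int) 1 := by
    apply List.filter_eq_self.mpr
    intro x hx
    have := (PySem.List.mem_pyRange_one).mp hx
    simp only [bne_iff_ne, ne_eq]
    omega
  have hhi : List.filter (fun j => j != (k : Int)) (PySem.List.pyRange ((k : Int)+1) n 1)
      = PySem.List.pyRange ((k : Int)+1) n 1 := by
    apply List.filter_eq_self.mpr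
    intro x hx
    have := (PySem.List.mem_pyRange_one).mp hx
    simp only [bne_iff_ne, ne_eq]
    omega
  rw [hlo, hhi]
  simp

-- B-side lemma 0: the guarded fold over j is the fold of the filtered, distance-mapped list
theorem foldB_filter (data : List (List Int)) (i : Int) (js : List Int) (b : List Int) :
    js.foldl (fun best j =>
      if j != i then (pvInsertSorted best (pvDist data i j)).take 8 else best) b
    = ((js.filter (fun j => j != i)).map (pvDist data i)).foldl
        (fun best d => (pvInsertSorted best d).take 8) b := by
  induction js generalizing b with
  | nil => rfl
  | cons j js ih =>
    simp only [List.foldl_cons, List.filter_cons]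
    by_cases h : (j != i) = true
    · rw [if_pos h, if_pos h]
      simp only [List.map_cons, List.foldl_cons]
      exact ih _
    · rw [if_neg h, if_neg h]
      exact ih b

-- B-side lemma 1: truncation commutes with ordered insertion
theorem insert_take (d : Int) (b : List Int) (k : Nat) :
    (pvInsertSorted (b.take k) d).take k = (pvInsertSorted b d).take k := by
  induction b generalizing k with
  | nil => simp
  | cons x xs ih =>
    cases k with
    | zero => rfl
    | succ m =>
      simp only [List.take_succ_cons, pvInsertSorted]
      by_cases h : x > d
      · simp only [if_pos h]
        cases m with
        | zero => rfl
        | succ p =>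
          simp only [List.take_succ_cons, List.take_take]
          have hmin : min p (p + 1) = p := by omega
          rw [hmin]
      · simp only [if_neg h, List.take_succ_cons, ih]

-- B-side lemma 2: the truncating fold is the truncation of plain insertion sort
theorem fold_take (L : List Int) (b : List Int) :
    L.foldl (fun best d => (pvInsertSorted best d).take 8) (b.take 8)
    = (L.foldl (fun best d => pvInsertSorted best d) b).take 8 := by
  induction L generalizing b with
  | nil => rfl
  | cons d L ih =>
    simp only [List.foldl_cons]
    rw [insert_take, ih]

theorem insertSorted_perm (b : List Int) (d : Int) : (pvInsertSorted b d).Perm (d :: b) := by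
  induction b with
  | nil => rfl
  | cons x xs ih =>
    simp only [pvInsertSorted]
    by_cases h : x > d
    · simp [h]
    · simp only [if_neg h]
      exact (ih.cons x).trans (List.Perm.swap d x xs)

theorem insertSorted_sorted (b : List Int) (d : Int) (hb : b.Pairwise (· ≤ ·)) :
    (pvInsertSorted b d).Pairwise (· ≤ ·) := by
  induction b with
  | nil => simp [pvInsertSorted]
  | cons x xs ih =>
    rcases List.pairwise_cons.mp hb with ⟨hx, hxs⟩
    simp only [pvInsertSorted]
    by_cases h : x > d
    · simp only [if_pos h]
      refine List.pairwise_cons.mpr ⟨?_, hb⟩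
      intro y hy
      rcases List.mem_cons.mp hy with rfl | hy
      · omega
      · exact le_trans (by omega) (hx _ hy)
    · simp only [if_neg h]
      refine List.pairwise_cons.mpr ⟨?_, ih hxs⟩
      intro y hy
      have hmem : y ∈ d :: xs := (insertSorted_perm xs d).mem_iff.mp hy
      rcases List.mem_cons.mp hmem with rfl | hy'
      · omega
      · exact hx _ hy'

-- B-side lemma 3: the plain insertion fold is Python's sorted
theorem fold_insert_sorted (L : List Int) :
    L.foldl (fun best d => pvInsertSorted best d) []
    = PySem.List.sorted L (fun x => x) false := by
  have key : ∀ (L b : List Int), b.Pairwise (· ≤ ·) →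
      (L.foldl (fun best d => pvInsertSorted best d) b).Perm (b ++ L)
      ∧ (L.foldl (fun best d => pvInsertSorted best d) b).Pairwise (· ≤ ·) := by
    intro L
    induction L with
    | nil => intro b hb; simpa using hb
    | cons d L ih =>
      intro b hb
      simp only [List.foldl_cons]
      obtain ⟨hp, hs⟩ := ih _ (insertSorted_sorted b d hb)
      refine ⟨hp.trans ?_, hs⟩
      have h1 : (pvInsertSorted b d ++ L).Perm ((d :: b) ++ L) :=
        (insertSorted_perm b d).append_right L
      have h2 : ((d :: b) ++ L).Perm (b ++ d :: L) := by
        simpa using (List.perm_middle (a := d) (l₁ := b) (l₂ := L)).symm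
      exact h1.trans h2
  obtain ⟨hp, hs⟩ := key L [] (by simp)
  have hp' : (L.foldl (fun best d => pvInsertSorted best d) []).Perm L := by simpa using hp
  exact (PySem.List.sorted_id_eq_of_perm_of_pairwise _ _ hp' hs).symm

-- ===== VERDICT (by name: the statement is the Claim_ definition above) =====
theorem generate_descriptors_spec : Claim_equal_generate_descriptors := by
  intro data _ _
  simp only [Spec_generate_descriptors, generate_descriptors, generate_descriptors_alt]
  apply List.ext_getElem?
  intro k
  rw [List.getElem?_map, List.getElem?_map,
      outerA data (data.length : Int) 0 le_rfl _ k, List.getElem?_map,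
      PySem.List.getElem?_pyRange_one]
  by_cases hk : k < ((data.length : Int) - 0).toNat
  · simp only [if_pos hk, Option.map_some, Option.map_eq_map, Option.some.injEq, zero_add,
      List.nil_append]
    have hkn : (k : Int) < (data.length : Int) := by omega
    have hrowA : pvExtra data (data.length : Int) 0 k
        = ((PySem.List.pyRange 0 (data.length : Int) 1).filter (fun j => j != (k : Int))).map
            (pvDist data (k : Int)) := by
      unfold pvExtra
      rw [if_pos (by omega), rowSplit data (data.length : Int) k hkn]
      congr 1
      exact List.map_congr_left (fun x _ => pvDist_symm data x (k : Int))
    rw [hrowA, foldB_filter, ← fold_insert_sorted, ← fold_take]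
    rfl
  · have hk' : ¬ k < data.length := by omega
    simp [hk']
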